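-- pv_equiv track=rewrite | github.com/CaliforniaCoach/adventofcode | 2019/13/program.py | append_output_to_field
-- ===== SOURCE A (Python) =====
-- def append_output_to_field(field, output):
--     triple = []
--     for out in output:
--         triple.append(out)
--         if len(triple) == 3:
--             if triple[0] == -1 and triple[1] == 0:
--                 score = triple[2]
--             else:
--                 field[(triple[0], triple[1])] = triple[2]
--             triple = []
--     return field
-- ===== SOURCE B (Python) =====
-- def append_output_to_field(field, output):
--     # Stage 1: index-chunk the flat list into full triples and build a staging
--     # dict of screen updates (score triples (-1, 0, s) carry no tile).
--     # Stage 2: merge the staged updates into the field in one bulk update.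
--     updates = {
--         (output[i], output[i + 1]): output[i + 2]
--         for i in range(0, len(output) - 2, 3)
--         if (output[i], output[i + 1]) != (-1, 0)
--     }
--     field.update(updates)
--     return field
-- ===== Notes on version B (the rewrite author's own statement) =====
-- stated objective: alternative
-- what changed: Instead of buffering items one by one and writing each triple straight into field, B index-chunks the flat list with a strided range, stages all tile writes in a separate updates dict built by comprehension, and merges them into field with one bulk dict.update; last-write-wins and first-insertion key order of dict.update make this equal to A's sequential writes.
import Mathlib
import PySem

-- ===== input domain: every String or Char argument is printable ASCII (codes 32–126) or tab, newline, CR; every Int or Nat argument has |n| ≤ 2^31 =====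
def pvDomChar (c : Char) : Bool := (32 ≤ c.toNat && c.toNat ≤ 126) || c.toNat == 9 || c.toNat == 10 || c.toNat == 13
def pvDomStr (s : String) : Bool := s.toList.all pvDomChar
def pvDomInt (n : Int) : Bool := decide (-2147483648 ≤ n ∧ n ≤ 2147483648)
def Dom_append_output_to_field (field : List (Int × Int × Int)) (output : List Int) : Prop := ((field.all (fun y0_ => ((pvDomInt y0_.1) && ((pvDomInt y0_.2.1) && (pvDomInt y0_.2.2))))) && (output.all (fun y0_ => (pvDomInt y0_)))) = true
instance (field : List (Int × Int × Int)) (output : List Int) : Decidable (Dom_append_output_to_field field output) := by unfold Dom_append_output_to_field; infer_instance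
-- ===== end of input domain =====

-- B stages all tile writes in a separate updates dict (built over a strided index range)
-- and merges it into field with one bulk update, instead of A's buffered per-triple writes
-- into field (alternative decomposition; same cost).
-- Both Pythons mutate the caller's dict `field` to the same final contents; the equivalence
-- proved here is about the returned value.

-- ===== PORT A =====
-- exact port of Python dict assignment d[(a,b)] = c on the flattened-triple representation:
-- overwrite in place on the first matching key, else append at the end
def pvDictSet (d : List (Int × Int × Int)) (a b c : Int) : List (Int × Int × Int) :=
  match d with
  | [] => [(a, b, c)]
  | (x, y, v) :: rest =>
      if x = a ∧ y = b then (a, b, c) :: rest else (x, y, v) :: pvDictSet rest a b c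

def pvALoop (field : List (Int × Int × Int)) (triple : List Int) (output : List Int) :
    List (Int × Int × Int) :=
  match output with
  | [] => field
  | out :: rest =>
      let t := triple ++ [out]
      if t.length = 3 then
        -- triple[0], triple[1], triple[2]: in range since len = 3
        let a := (PySem.List.pyGet? t 0).getD 0
        let b := (PySem.List.pyGet? t 1).getD 0
        let c := (PySem.List.pyGet? t 2).getD 0
        if a = -1 ∧ b = 0 then
          pvALoop field [] rest        -- score := c (dead local), field untouched
        else
          pvALoop (pvDictSet field a b c) [] rest
      else
        pvALoop field t rest

def append_output_to_field (field : List (Int × Int × Int)) (output : List Int) :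
    List (Int × Int × Int) :=
  pvALoop field [] output

-- ===== PORT B =====
-- updates = {(output[i], output[i+1]): output[i+2] for i in range(0, len(output)-2, 3)
--            if (output[i], output[i+1]) != (-1, 0)}
-- indices produced by the strided range are always in range, so pyGetD is exact here
def pvBuildUpdates (output : List Int) : List (Int × Int × Int) :=
  (PySem.List.pyRange 0 ((output.length : Int) - 2) 3).foldl
    (fun u i =>
      if PySem.List.pyGetD output i 0 = -1 ∧ PySem.List.pyGetD output (i + 1) 0 = 0 then u
      else pvDictSet u (PySem.List.pyGetD output i 0) (PySem.List.pyGetD output (i + 1) 0)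
             (PySem.List.pyGetD output (i + 2) 0)) []

-- field.update(updates): sequential dict assignment of updates' entries in order
def append_output_to_field_alt (field : List (Int × Int × Int)) (output : List Int) :
    List (Int × Int × Int) :=
  (pvBuildUpdates output).foldl (fun d t => pvDictSet d t.1 t.2.1 t.2.2) field

-- ===== PRECONDITION & SPEC =====
def Spec_append_output_to_field (field : List (Int × Int × Int)) (output : List Int) (out : List (Int × Int × Int)) : Prop := out = append_output_to_field_alt field output
instance (field : List (Int × Int × Int)) (output : List Int) (out : List (Int × Int × Int)) : Decidable (Spec_append_output_to_field field output out) := by unfold Spec_append_output_to_field; infer_instance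

-- ===== CLAIM (what is proved, stated in full; the proofs are below) =====
def Claim_equal_append_output_to_field : Prop := ∀ (field : List (Int × Int × Int)) (output : List Int), Dom_append_output_to_field field output → Spec_append_output_to_field field output (append_output_to_field field output)

-- ===== LEMMAS AND PROOFS =====

-- the full triples of the flat list
def pvChunks : List Int → List (Int × Int × Int)
  | a :: b :: c :: r => (a, b, c) :: pvChunks r
  | _ => []

-- one triple step of A (skip score triples), folded over the chunk list
def pvF (d : List (Int × Int × Int)) (t : Int × Int × Int) : List (Int × Int × Int) :=
  if t.1 = -1 ∧ t.2.1 = 0 then d else pvDictSet d t.1 t.2.1 t.2.2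

def pvFF (d : List (Int × Int × Int)) (ts : List (Int × Int × Int)) : List (Int × Int × Int) :=
  ts.foldl pvF d

-- sequential dict assignment of a list of entries (the merge in B)
def pvG (d u : List (Int × Int × Int)) : List (Int × Int × Int) :=
  u.foldl (fun d t => pvDictSet d t.1 t.2.1 t.2.2) d

def pvKeys (u : List (Int × Int × Int)) : List (Int × Int) :=
  u.map (fun t => (t.1, t.2.1))

theorem pvKeys_cons (x y v : Int) (tl : List (Int × Int × Int)) :
    pvKeys ((x, y, v) :: tl) = (x, y) :: pvKeys tl := rfl

theorem pvKeys_set (d : List (Int × Int × Int)) (a b c : Int) :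
    pvKeys (pvDictSet d a b c) =
      if (a, b) ∈ pvKeys d then pvKeys d else pvKeys d ++ [(a, b)] := by
  induction d with
  | nil => simp [pvDictSet, pvKeys]
  | cons hd tl ih =>
      obtain ⟨x, y, v⟩ := hd
      by_cases h : x = a ∧ y = b
      · obtain ⟨rfl, rfl⟩ := h
        simp [pvDictSet, pvKeys]
      · have hne : ¬ (((a, b) : Int × Int) = (x, y)) := by
          intro he; injection he with h1 h2; exact h ⟨h1.symm, h2.symm⟩
        simp only [pvDictSet, if_neg h, pvKeys_cons, List.mem_cons, hne, false_or]
        rw [ih]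
        split_ifs <;> simp

theorem pvMem_keys_set (d : List (Int × Int × Int)) (a b c : Int) :
    (a, b) ∈ pvKeys (pvDictSet d a b c) := by
  rw [pvKeys_set]
  split_ifs with h
  · exact h
  · simp

theorem pvMem_keys_set_of_mem (d : List (Int × Int × Int)) (a b c x y : Int)
    (h : (x, y) ∈ pvKeys d) : (x, y) ∈ pvKeys (pvDictSet d a b c) := by
  rw [pvKeys_set]
  split_ifs <;> simp [h]

theorem pvNodup_keys_set (d : List (Int × Int × Int)) (a b c : Int)
    (h : (pvKeys d).Nodup) : (pvKeys (pvDictSet d a b c)).Nodup := by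
  rw [pvKeys_set]
  split_ifs with hm
  · exact h
  · refine h.append (List.nodup_singleton _) ?_
    intro p hp hq
    simp only [List.mem_singleton] at hq
    subst hq
    exact hm hp

theorem pvSet_set_same (d : List (Int × Int × Int)) (a b c c' : Int) :
    pvDictSet (pvDictSet d a b c') a b c = pvDictSet d a b c := by
  induction d with
  | nil => simp [pvDictSet]
  | cons hd tl ih =>
      obtain ⟨x, y, v⟩ := hd
      by_cases h : x = a ∧ y = b
      · obtain ⟨rfl, rfl⟩ := h
        simp [pvDictSet]
      · simp [pvDictSet, h, ih]

theorem pvSet_swap (d : List (Int × Int × Int)) (a b c x y w : Int)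
    (hm : (a, b) ∈ pvKeys d) (hne : ((a, b) : Int × Int) ≠ (x, y)) :
    pvDictSet (pvDictSet d a b c) x y w = pvDictSet (pvDictSet d x y w) a b c := by
  induction d with
  | nil => simp [pvKeys] at hm
  | cons hd tl ih =>
      obtain ⟨p, q, v⟩ := hd
      by_cases h1 : p = a ∧ q = b
      · obtain ⟨rfl, rfl⟩ := h1
        have h2 : ¬ (p = x ∧ q = y) := by
          rintro ⟨rfl, rfl⟩; exact hne rfl
        simp [pvDictSet, h2]
      · by_cases h2 : p = x ∧ q = y
        · obtain ⟨rfl, rfl⟩ := h2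
          simp [pvDictSet, h1]
        · have hm' : (a, b) ∈ pvKeys tl := by
            rcases (by simpa [pvKeys_cons] using hm : ((a, b) : Int × Int) = (p, q) ∨ (a, b) ∈ pvKeys tl) with h | h
            · injection h with e1 e2; exact absurd ⟨e1.symm, e2.symm⟩ h1
            · exact h
          simp [pvDictSet, h1, h2, ih hm']

theorem pvSetG (u : List (Int × Int × Int)) : ∀ (d : List (Int × Int × Int)) (a b c : Int),
    (a, b) ∈ pvKeys d → (a, b) ∉ pvKeys u →
    pvG (pvDictSet d a b c) u = pvDictSet (pvG d u) a b c := by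
  induction u with
  | nil => intro d a b c _ _; rfl
  | cons hd tl ih =>
      intro d a b c hd1 hu
      obtain ⟨x, y, w⟩ := hd
      have hne : ((a, b) : Int × Int) ≠ (x, y) := by
        intro he; apply hu; rw [pvKeys_cons, he]; simp
      have hnu : (a, b) ∉ pvKeys tl := by
        intro h; exact hu (by rw [pvKeys_cons]; exact List.mem_cons_of_mem _ h)
      show pvG (pvDictSet (pvDictSet d a b c) x y w) tl = _
      rw [pvSet_swap d a b c x y w hd1 hne]
      rw [ih (pvDictSet d x y w) a b c (pvMem_keys_set_of_mem _ _ _ _ _ _ hd1) hnu]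
      rfl

theorem pvCom (u : List (Int × Int × Int)) : ∀ (d : List (Int × Int × Int)) (a b c : Int),
    (pvKeys u).Nodup →
    pvDictSet (pvG d u) a b c = pvG d (pvDictSet u a b c) := by
  induction u with
  | nil => intro d a b c _; rfl
  | cons hd tl ih =>
      intro d a b c hn
      obtain ⟨x, y, w⟩ := hd
      rw [pvKeys_cons] at hn
      obtain ⟨hxy, hntl⟩ := List.nodup_cons.mp hn
      by_cases h : x = a ∧ y = b
      · obtain ⟨rfl, rfl⟩ := h
        show pvDictSet (pvG (pvDictSet d x y w) tl) x y c = pvG d (pvDictSet ((x, y, w) :: tl) x y c)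
        rw [show pvDictSet ((x, y, w) :: tl) x y c = (x, y, c) :: tl by simp [pvDictSet]]
        show _ = pvG (pvDictSet d x y c) tl
        rw [← pvSetG tl (pvDictSet d x y w) x y c (pvMem_keys_set _ _ _ _) hxy]
        rw [pvSet_set_same]
      · rw [show pvDictSet ((x, y, w) :: tl) a b c = (x, y, w) :: pvDictSet tl a b c by
            simp [pvDictSet, h]]
        show pvDictSet (pvG (pvDictSet d x y w) tl) a b c
            = pvG (pvDictSet d x y w) (pvDictSet tl a b c)
        exact ih (pvDictSet d x y w) a b c hntl

theorem pvComF (u d : List (Int × Int × Int)) (t : Int × Int × Int)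
    (h : (pvKeys u).Nodup) : pvF (pvG d u) t = pvG d (pvF u t) := by
  unfold pvF
  split_ifs
  · rfl
  · exact pvCom u d t.1 t.2.1 t.2.2 h

theorem pvNodup_keys_F (u : List (Int × Int × Int)) (t : Int × Int × Int)
    (h : (pvKeys u).Nodup) : (pvKeys (pvF u t)).Nodup := by
  unfold pvF
  split_ifs
  · exact h
  · exact pvNodup_keys_set _ _ _ _ h

theorem pvM (ts : List (Int × Int × Int)) : ∀ (d u : List (Int × Int × Int)),
    (pvKeys u).Nodup → pvFF (pvG d u) ts = pvG d (pvFF u ts) := by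
  induction ts with
  | nil => intro d u _; rfl
  | cons t ts ih =>
      intro d u hn
      show pvFF (pvF (pvG d u) t) ts = pvG d (pvFF (pvF u t) ts)
      rw [pvComF u d t hn]
      exact ih d (pvF u t) (pvNodup_keys_F u t hn)

theorem pvA_char (output : List Int) : ∀ (field : List (Int × Int × Int)),
    pvALoop field [] output = pvFF field (pvChunks output) := by
  induction output using pvChunks.induct with
  | case1 a b c r ih =>
      intro field
      simp only [pvALoop, List.nil_append, List.cons_append, List.length,
        PySem.List.pyGet?, PySem.List.pyIdx?]
      norm_num
      simp only [pvChunks, pvFF, List.foldl_cons, pvF]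
      split_ifs with h <;> simpa [h] using ih _
  | case2 x h =>
      intro field
      rcases x with _ | ⟨a, _ | ⟨b, _ | ⟨c, r⟩⟩⟩
      · rfl
      · simp [pvALoop, pvFF, pvChunks]
      · simp [pvALoop, pvFF, pvChunks]
      · exact absurd rfl (h a b c r)

theorem pvRange3_nil (a b : Int) (h : b ≤ a) : PySem.List.pyRange a b 3 = [] := by
  rw [PySem.List.pyRange_of_pos a b (by norm_num)]
  simp [show ¬ a < b from not_lt.mpr h]

theorem pvRange3_cons (a b : Int) (h : a < b) :
    PySem.List.pyRange a b 3 = a :: PySem.List.pyRange (a + 3) b 3 := by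
  rw [PySem.List.pyRange_of_pos a b (by norm_num),
      PySem.List.pyRange_of_pos (a + 3) b (by norm_num)]
  have hc : (if a < b then ((b - a + 3 - 1) / 3).toNat else 0)
      = (if a + 3 < b then ((b - (a + 3) + 3 - 1) / 3).toNat else 0) + 1 := by
    split_ifs <;> omega
  rw [hc, List.range_succ_eq_map]
  simp only [List.map_cons, List.map_map, Nat.cast_zero, mul_zero, add_zero]
  congr 1
  apply List.map_congr_left
  intro k _
  simp only [Function.comp_apply]
  push_cast
  ring

theorem pvGetAppend (pre l : List Int) (k : Nat) :
    PySem.List.pyGetD (pre ++ l) ((pre.length + k : Nat) : Int) 0 = l.getD k 0 := by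
  rw [PySem.List.pyGetD_natCast]
  simp [List.getD, List.getElem?_append_right (Nat.le_add_right pre.length k)]

theorem pvB_char (suf : List Int) : ∀ (pre : List Int) (u : List (Int × Int × Int)),
    (PySem.List.pyRange (pre.length : Int) ((pre.length : Int) + (suf.length : Int) - 2) 3).foldl
      (fun u i =>
        if PySem.List.pyGetD (pre ++ suf) i 0 = -1 ∧ PySem.List.pyGetD (pre ++ suf) (i + 1) 0 = 0 then u
        else pvDictSet u (PySem.List.pyGetD (pre ++ suf) i 0) (PySem.List.pyGetD (pre ++ suf) (i + 1) 0)
               (PySem.List.pyGetD (pre ++ suf) (i + 2) 0)) u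
    = pvFF u (pvChunks suf) := by
  induction suf using pvChunks.induct with
  | case1 a b c r ih =>
      intro pre u
      have hL : (pre.length : Int) < (pre.length : Int) + ((a :: b :: c :: r).length : Int) - 2 := by
        simp only [List.length_cons]
        push_cast
        omega
      rw [pvRange3_cons _ _ hL, List.foldl_cons]
      have e0 : PySem.List.pyGetD (pre ++ a :: b :: c :: r) ((pre.length : Nat) : Int) 0 = a := by
        have h0 := pvGetAppend pre (a :: b :: c :: r) 0
        push_cast at h0
        exact h0
      have e2 : PySem.List.pyGetD (pre ++ a :: b :: c :: r) (((pre.length : Nat) : Int) + 1) 0 = b := by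
        have := pvGetAppend pre (a :: b :: c :: r) 1
        push_cast at this ⊢
        exact this
      have e3 : PySem.List.pyGetD (pre ++ a :: b :: c :: r) (((pre.length : Nat) : Int) + 2) 0 = c := by
        have := pvGetAppend pre (a :: b :: c :: r) 2
        push_cast at this ⊢
        exact this
      rw [e0, e2, e3]
      have key := ih (pre ++ [a, b, c]) (if a = -1 ∧ b = 0 then u else pvDictSet u a b c)
      have hfull : (pre ++ [a, b, c]) ++ r = pre ++ a :: b :: c :: r := by simp
      have hlen : (((pre ++ [a, b, c]).length : Nat) : Int) = (pre.length : Int) + 3 := by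
        simp only [List.length_append, List.length_cons, List.length_nil]
        push_cast
        ring
      rw [hfull, hlen] at key
      have hb' : (pre.length : Int) + 3 + (r.length : Int) - 2
          = (pre.length : Int) + ((a :: b :: c :: r).length : Int) - 2 := by
        simp only [List.length_cons]
        push_cast
        ring
      rw [hb'] at key
      rw [key]
      simp only [pvChunks, pvFF, List.foldl_cons, pvF]
  | case2 x h =>
      intro pre u
      have hnil : PySem.List.pyRange (pre.length : Int) ((pre.length : Int) + (x.length : Int) - 2) 3 = [] := by
        apply pvRange3_nil
        rcases x with _ | ⟨a, _ | ⟨b, _ | ⟨c, r⟩⟩⟩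
        · simp only [List.length_nil]; push_cast; omega
        · simp only [List.length_cons, List.length_nil]; push_cast; omega
        · simp only [List.length_cons, List.length_nil]; push_cast; omega
        · exact absurd rfl (h a b c r)
      rw [hnil]
      rcases x with _ | ⟨a, _ | ⟨b, _ | ⟨c, r⟩⟩⟩
      · rfl
      · rfl
      · rfl
      · exact absurd rfl (h a b c r)

-- ===== VERDICT (by name: the statement is the Claim_ definition above) =====
theorem append_output_to_field_spec : Claim_equal_append_output_to_field := by
  intro field output _
  unfold Spec_append_output_to_field append_output_to_field append_output_to_field_alt
  have hb : pvBuildUpdates output = pvFF [] (pvChunks output) := by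
    have := pvB_char output [] []
    simpa [pvBuildUpdates] using this
  rw [pvA_char, hb]
  have : pvFF (pvG field []) (pvChunks output) = pvG field (pvFF [] (pvChunks output)) :=
    pvM (pvChunks output) field [] (by simp [pvKeys])
  simpa [pvG] using this
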